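-- pv_equiv track=rewrite | github.com/johanngerberding/adventofcode2020 | advent_python/day17.py | part_1
-- ===== SOURCE A (Python) =====
-- import collections
-- import itertools
--
-- def part_1(raw: str) -> int:
--     grid = collections.defaultdict(int)
--
--     for x, row in enumerate(raw.split('\n')):
--         for y, val in enumerate(row):
--             if val == '#':
--                 grid[(x,y,0)] = 1
--
--     for _ in range(6):
--         # create a new neighbors dict
--         neighbors = collections.defaultdict(int)
--         # iterate over active cubes
--         for coord, val in grid.items():
--             if val:
--                 # itertools product -> cartesian product
--                 for delta in itertools.product([-1, 0, 1], repeat=3):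
--                     # for any delta thats not (0,0,0)
--                     if any(delta):
--                         neighbors[tuple(map(sum, zip(coord, delta)))] += 1
--
--
--
--         _grid = collections.defaultdict(int)
--
--         for coords, val in neighbors.items():
--             if val == 3 or (grid[coords] and val == 2):
--                 _grid[coords] = 1
--
--         grid = _grid
--
--     return len(grid)
-- ===== SOURCE B (Python) =====
-- def part_1(raw: str) -> int:
--     active = set()
--     for x, row in enumerate(raw.split('\n')):
--         for y, ch in enumerate(row):
--             if ch == '#':
--                 active.add((x, y, 0))
--     for _ in range(6):
--         if not active:
--             break
--         lox = min(c[0] for c in active) - 1; hix = max(c[0] for c in active) + 1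
--         loy = min(c[1] for c in active) - 1; hiy = max(c[1] for c in active) + 1
--         loz = min(c[2] for c in active) - 1; hiz = max(c[2] for c in active) + 1
--         nxt = set()
--         for x in range(lox, hix + 1):
--             for y in range(loy, hiy + 1):
--                 for z in range(loz, hiz + 1):
--                     cnt = 0
--                     for dx in (-1, 0, 1):
--                         for dy in (-1, 0, 1):
--                             for dz in (-1, 0, 1):
--                                 if (dx or dy or dz) and (x + dx, y + dy, z + dz) in active:
--                                     cnt += 1
--                     if cnt == 3 or ((x, y, z) in active and cnt == 2):
--                         nxt.add((x, y, z))
--         active = nxt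
--     return len(active)
-- ===== Notes on version B (the rewrite author's own statement) =====
-- stated objective: alternative
-- what changed: A accumulates per-neighbour increments of every active cell into a defaultdict and keeps cells whose accumulated count passes the rule; B instead scans every cell of the active set's bounding box expanded by 1 and counts that cell's active neighbours directly by membership tests against the set.
import Mathlib
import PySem

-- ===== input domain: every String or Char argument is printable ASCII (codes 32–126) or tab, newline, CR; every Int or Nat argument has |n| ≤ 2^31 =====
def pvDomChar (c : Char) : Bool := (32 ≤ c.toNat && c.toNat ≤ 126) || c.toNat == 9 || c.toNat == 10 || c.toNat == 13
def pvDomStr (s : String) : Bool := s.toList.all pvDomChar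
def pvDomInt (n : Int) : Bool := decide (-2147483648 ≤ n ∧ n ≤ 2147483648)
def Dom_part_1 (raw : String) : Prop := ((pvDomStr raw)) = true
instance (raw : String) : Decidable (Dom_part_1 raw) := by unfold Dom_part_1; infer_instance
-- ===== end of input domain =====

-- B replaces A's neighbour-counting dict with a bounding-box scan of the active set
-- (alternative decomposition: per-cell neighbour counting instead of per-cell count accumulation).

-- B replaces A's neighbour-count dictionary by a bounding-box scan that counts each
-- cell's active neighbours directly against the current active set (alternative decomposition).

-- ===== PORT A =====
-- itertools.product([-1, 0, 1], repeat=3), in product order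
def pvProduct3 : List (Int × Int × Int) :=
  [-1, 0, 1].flatMap fun a => [-1, 0, 1].flatMap fun b => [-1, 0, 1].map fun c => (a, b, c)

-- one pass of A's `for _ in range(6)` body
def pvStepA (grid : PySem.Dict (Int × Int × Int) Int) : PySem.Dict (Int × Int × Int) Int :=
  let neighbors : PySem.Dict (Int × Int × Int) Int :=
    grid.items.foldl (fun nb p =>
      if p.2 ≠ 0 then
        pvProduct3.foldl (fun nb d =>
          if d.1 ≠ 0 ∨ d.2.1 ≠ 0 ∨ d.2.2 ≠ 0 then
            nb.modify (p.1.1 + d.1, p.1.2.1 + d.2.1, p.1.2.2 + d.2.2) 0 (· + 1)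
          else nb) nb
      else nb) PySem.Dict.empty
  neighbors.items.foldl (fun g q =>
    if q.2 = 3 ∨ (grid.getD q.1 0 ≠ 0 ∧ q.2 = 2) then g.insert q.1 1 else g)
    PySem.Dict.empty

def part_1 (raw : String) : Int :=
  let grid0 : PySem.Dict (Int × Int × Int) Int :=
    (PySem.List.enumerate (PySem.Chars.splitOn raw.toList ['\n'])).foldl (fun g xr =>
      (PySem.List.enumerate xr.2).foldl (fun g yc =>
        if yc.2 = '#' then g.insert (xr.1, yc.1, (0 : Int)) 1 else g) g)
      PySem.Dict.empty
  (((PySem.List.pyRange 0 6).foldl (fun g _ => pvStepA g) grid0).size : Int)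

-- ===== PORT B =====
-- one pass of B's loop body: scan the bounding box of the active set, expanded by 1.
-- min(...)/max(...) in Source B run on a nonempty set (guarded by `if not active: break`),
-- so `(PySem.List.min? …).getD 0` is exact there: the default is never used.
def pvStepB (active : PySem.Set (Int × Int × Int)) : PySem.Set (Int × Int × Int) :=
  if active.isEmpty then active else
  let lox := (PySem.List.min? (active.map (·.1)) (fun v => v)).getD 0 - 1
  let hix := (PySem.List.max? (active.map (·.1)) (fun v => v)).getD 0 + 1
  let loy := (PySem.List.min? (active.map (·.2.1)) (fun v => v)).getD 0 - 1
  let hiy := (PySem.List.max? (active.map (·.2.1)) (fun v => v)).getD 0 + 1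
  let loz := (PySem.List.min? (active.map (·.2.2)) (fun v => v)).getD 0 - 1
  let hiz := (PySem.List.max? (active.map (·.2.2)) (fun v => v)).getD 0 + 1
  (PySem.List.pyRange lox (hix + 1)).foldl (fun nxt x =>
    (PySem.List.pyRange loy (hiy + 1)).foldl (fun nxt y =>
      (PySem.List.pyRange loz (hiz + 1)).foldl (fun nxt z =>
        let cnt : Int :=
          ([-1, 0, 1] : List Int).foldl (fun cnt dx =>
            ([-1, 0, 1] : List Int).foldl (fun cnt dy =>
              ([-1, 0, 1] : List Int).foldl (fun cnt dz =>
                if (dx ≠ 0 ∨ dy ≠ 0 ∨ dz ≠ 0) ∧ (x + dx, y + dy, z + dz) ∈ active then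
                  cnt + 1
                else cnt) cnt) cnt) 0
        if cnt = 3 ∨ ((x, y, z) ∈ active ∧ cnt = 2) then PySem.Set.add nxt (x, y, z) else nxt)
        nxt) nxt) PySem.Set.empty

def part_1_alt (raw : String) : Int :=
  let active0 : PySem.Set (Int × Int × Int) :=
    (PySem.List.enumerate (PySem.Chars.splitOn raw.toList ['\n'])).foldl (fun s xr =>
      (PySem.List.enumerate xr.2).foldl (fun s yc =>
        if yc.2 = '#' then PySem.Set.add s (xr.1, yc.1, (0 : Int)) else s) s)
      PySem.Set.empty
  PySem.List.len ((PySem.List.pyRange 0 6).foldl (fun s _ => pvStepB s) active0)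

-- ===== PRECONDITION & SPEC =====
def Spec_part_1 (raw : String) (out : Int) : Prop := out = part_1_alt raw
instance (raw : String) (out : Int) : Decidable (Spec_part_1 raw out) := by unfold Spec_part_1; infer_instance

-- ===== CLAIM (what is proved, stated in full; the proofs are below) =====
def Claim_equal_part_1 : Prop := ∀ (raw : String), Dom_part_1 raw → Spec_part_1 raw (part_1 raw)

-- ===== LEMMAS AND PROOFS =====

def pvD26 : List (Int × Int × Int) :=
  pvProduct3.filter fun d => decide (d.1 ≠ 0 ∨ d.2.1 ≠ 0 ∨ d.2.2 ≠ 0)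
def pvShift (c d : Int × Int × Int) : Int × Int × Int :=
  (c.1 + d.1, c.2.1 + d.2.1, c.2.2 + d.2.2)

theorem pvD26_nodup : pvD26.Nodup := by decide
theorem pvD26_neg_mem : ∀ d ∈ pvD26, (-d.1, -d.2.1, -d.2.2) ∈ pvD26 := by decide
theorem pvD26_bounds : ∀ d ∈ pvD26, -1 ≤ d.1 ∧ d.1 ≤ 1 ∧ -1 ≤ d.2.1 ∧ d.2.1 ≤ 1 ∧ -1 ≤ d.2.2 ∧ d.2.2 ≤ 1 := by decide

theorem pvShift_inj (a : Int × Int × Int) : Function.Injective (pvShift a) := by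
  intro d d' h
  simp [pvShift, Prod.ext_iff] at h
  obtain ⟨h1, h2, h3⟩ := h
  exact Prod.ext (by omega) (Prod.ext (by omega) (by omega))

theorem pvMemSwap (a c : Int × Int × Int) :
    c ∈ pvD26.map (pvShift a) ↔ a ∈ pvD26.map (pvShift c) := by
  constructor <;>
  · intro h
    simp only [List.mem_map] at h ⊢
    obtain ⟨d, hd, he⟩ := h
    refine ⟨(-d.1, -d.2.1, -d.2.2), pvD26_neg_mem d hd, ?_⟩
    simp [pvShift, Prod.ext_iff] at he ⊢
    omega


theorem pvSumInd {α : Type} (l : List α) (p : α → Bool) :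
    (l.map (fun a => if p a then (1:Nat) else 0)).sum = l.countP p := by
  induction l with
  | nil => simp
  | cons x xs ih => by_cases h : p x <;> simp [h, ih] <;> omega

theorem pvCountInter {α : Type} [BEq α] [LawfulBEq α] (l₁ l₂ : List α)
    (h₁ : l₁.Nodup) (h₂ : l₂.Nodup) :
    l₁.countP (fun x => decide (x ∈ l₂)) = l₂.countP (fun x => decide (x ∈ l₁)) := by
  rw [List.countP_eq_length_filter, List.countP_eq_length_filter]
  apply List.Perm.length_eq
  rw [List.perm_ext_iff_of_nodup (h₁.filter _) (h₂.filter _)]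
  intro a; simp [List.mem_filter, and_comm]

def pvN (s : List (Int × Int × Int)) (c : Int × Int × Int) : Nat :=
  pvD26.countP fun d => decide (pvShift c d ∈ s)

theorem pvCountL (keys : List (Int × Int × Int)) (hk : keys.Nodup) (c : Int × Int × Int) :
    (keys.flatMap fun a => pvD26.map (pvShift a)).count c = pvN keys c := by
  rw [List.count_flatMap]
  calc (keys.map (List.count c ∘ fun a => pvD26.map (pvShift a))).sum
      = (keys.map (fun a => if (fun a => decide (a ∈ pvD26.map (pvShift c))) a then (1:Nat) else 0)).sum := by
        apply congrArg; apply List.map_congr_left; intro a _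
        by_cases h : a ∈ pvD26.map (pvShift c)
        · simp only [Function.comp, h, decide_true, if_true]
          exact List.count_eq_one_of_mem (pvD26_nodup.map (pvShift_inj a)) ((pvMemSwap a c).2 h)
        · simp only [Function.comp, h, decide_false, if_false]
          exact List.count_eq_zero_of_not_mem (fun hc => h ((pvMemSwap a c).1 hc))
    _ = keys.countP (fun a => decide (a ∈ pvD26.map (pvShift c))) := pvSumInd _ _
    _ = (pvD26.map (pvShift c)).countP (fun a => decide (a ∈ keys)) :=
        pvCountInter _ _ hk (pvD26_nodup.map (pvShift_inj c))
    _ = pvN keys c := by rw [List.countP_map]; rfl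
def pvNbrs (g : PySem.Dict (Int × Int × Int) Int) : PySem.Dict (Int × Int × Int) Int :=
  (g.keys.flatMap fun a => pvD26.map (pvShift a)).foldl (fun nb x => nb.modify x 0 (· + 1))
    PySem.Dict.empty

theorem pvStepA_eq (g : PySem.Dict (Int × Int × Int) Int)
    (hv : ∀ p ∈ g.items, p.2 = (1 : Int)) :
    pvStepA g = (pvNbrs g).items.foldl (fun g' q =>
      if q.2 = 3 ∨ (g.getD q.1 0 ≠ 0 ∧ q.2 = 2) then g'.insert q.1 1 else g')
      PySem.Dict.empty := by
  have hn : (g.items.foldl (fun nb p =>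
      if p.2 ≠ 0 then
        pvProduct3.foldl (fun nb d =>
          if d.1 ≠ 0 ∨ d.2.1 ≠ 0 ∨ d.2.2 ≠ 0 then
            nb.modify (p.1.1 + d.1, p.1.2.1 + d.2.1, p.1.2.2 + d.2.2) 0 (· + 1)
          else nb) nb
      else nb) PySem.Dict.empty) = pvNbrs g := by
    unfold pvNbrs
    rw [List.foldl_flatMap]
    simp only [PySem.Dict.keys]
    rw [List.foldl_map]
    apply PySem.List.foldl_congr_mem
    intro nb p hp
    rw [if_pos (by rw [hv p hp]; norm_num)]
    rw [List.foldl_map, PySem.List.foldl_ite_eq_foldl_filter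
      (p := fun d : Int × Int × Int => d.1 ≠ 0 ∨ d.2.1 ≠ 0 ∨ d.2.2 ≠ 0)
      (f := fun (nb : PySem.Dict (Int × Int × Int) Int) (d : Int × Int × Int) =>
        nb.modify (p.1.1 + d.1, p.1.2.1 + d.2.1, p.1.2.2 + d.2.2) 0 (· + 1))]
    rfl
  unfold pvStepA
  rw [hn]
theorem pvNbrs_keys_nodup (g : PySem.Dict (Int × Int × Int) Int) : (pvNbrs g).keys.Nodup := by
  unfold pvNbrs
  exact PySem.Dict.nodup_keys_foldl_modify_key _ (fun x => x) 0 (fun _ _ v => v + 1) _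
    PySem.Dict.nodup_keys_empty

theorem pvNbrs_getD (g : PySem.Dict (Int × Int × Int) Int) (hk : g.keys.Nodup)
    (c : Int × Int × Int) : (pvNbrs g).getD c 0 = (pvN g.keys c : Int) := by
  unfold pvNbrs
  rw [PySem.Dict.getD_foldl_modify_add_one, PySem.Dict.getD_empty, pvCountL _ hk]
  simp

theorem pvNbrs_mem_keys (g : PySem.Dict (Int × Int × Int) Int) (hk : g.keys.Nodup)
    (c : Int × Int × Int) : c ∈ (pvNbrs g).keys ↔ 1 ≤ pvN g.keys c := by
  unfold pvNbrs
  rw [PySem.Dict.keys_foldl_modify_key _ (fun x => x) 0 (fun _ _ v => v + 1)]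
  rw [PySem.Dict.keys_empty, List.map_id', PySem.Set.update_nil_left, PySem.Set.mem_ofList]
  rw [← List.count_pos_iff, pvCountL _ hk c]
  omega
theorem pvValuesOne {κ β : Type} [BEq κ] [LawfulBEq κ] (l : List β) (k : β → κ)
    (d : PySem.Dict κ Int) (hd : ∀ p ∈ d.items, p.2 = (1 : Int)) :
    ∀ p ∈ (l.foldl (fun g x => g.insert (k x) 1) d).items, p.2 = (1 : Int) := by
  induction l generalizing d with
  | nil => simpa using hd
  | cons x xs ih =>
    intro p hp
    refine ih (d.insert (k x) 1) ?_ p hp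
    intro q hq
    rcases (PySem.Dict.mem_items_insert d (k x) 1 q).1 hq with h | h
    · simp [h]
    · exact hd q h.1

theorem pvGetD_one (g : PySem.Dict (Int × Int × Int) Int)
    (hk : g.keys.Nodup) (hv : ∀ p ∈ g.items, p.2 = (1 : Int)) (c : Int × Int × Int) :
    g.getD c 0 = if c ∈ g.keys then 1 else 0 := by
  by_cases h : c ∈ g.keys
  · rw [if_pos h]
    simp only [PySem.Dict.keys, List.mem_map] at h
    obtain ⟨p, hp, hpc⟩ := h
    have := PySem.Dict.getD_of_mem_items g (k := c) (v := p.2) (by rw [← hpc]; exact hp) hk 0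
    rw [this, hv p hp]
  · rw [if_neg h, PySem.Dict.getD_of_not_contains]
    rw [← Bool.not_eq_true, PySem.Dict.contains_iff_mem_keys]
    exact h

theorem pvStepA_char (g : PySem.Dict (Int × Int × Int) Int)
    (hk : g.keys.Nodup) (hv : ∀ p ∈ g.items, p.2 = (1 : Int)) :
    (pvStepA g).keys.Nodup ∧ (∀ p ∈ (pvStepA g).items, p.2 = (1 : Int)) ∧
      (∀ c, c ∈ (pvStepA g).keys ↔
        (pvN g.keys c = 3 ∨ (c ∈ g.keys ∧ pvN g.keys c = 2))) := by
  rw [pvStepA_eq g hv]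
  rw [PySem.List.foldl_ite_eq_foldl_filter
    (p := fun q : (Int × Int × Int) × Int => q.2 = 3 ∨ (g.getD q.1 0 ≠ 0 ∧ q.2 = 2))
    (f := fun (g' : PySem.Dict (Int × Int × Int) Int) (q : (Int × Int × Int) × Int) => g'.insert q.1 1)]
  refine ⟨?_, ?_, ?_⟩
  · exact PySem.Dict.nodup_keys_foldl_insert_key _ (fun q : (Int × Int × Int) × Int => q.1)
      (fun _ _ => (1 : Int)) PySem.Dict.empty PySem.Dict.nodup_keys_empty
  · exact pvValuesOne _ (fun q : (Int × Int × Int) × Int => q.1) PySem.Dict.empty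
      (by simp [PySem.Dict.empty])
  · intro c
    rw [PySem.Dict.keys_foldl_insert_key _ (fun q : (Int × Int × Int) × Int => q.1)
      (fun _ _ => (1 : Int)) PySem.Dict.empty, PySem.Dict.keys_empty,
      PySem.Set.update_nil_left, PySem.Set.mem_ofList]
    rw [PySem.Dict.items_eq_map_keys _ (pvNbrs_keys_nodup g) 0]
    simp only [List.filter_map, List.map_map, List.mem_map, List.mem_filter, Function.comp,
      decide_eq_true_eq]
    constructor
    · rintro ⟨k, ⟨hkmem, hcond⟩, rfl⟩
      have hgd := pvNbrs_getD g hk k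
      simp only [hgd] at hcond
      have hmem1 := (pvNbrs_mem_keys g hk k).1 hkmem
      have hg1 := pvGetD_one g hk hv k
      rcases hcond with h3 | ⟨hne, h2⟩
      · left; exact_mod_cast h3
      · right
        constructor
        · by_contra hnot; rw [hg1, if_neg hnot] at hne; exact hne rfl
        · exact_mod_cast h2
    · intro hcond
      refine ⟨c, ⟨?_, ?_⟩, rfl⟩
      · rw [pvNbrs_mem_keys g hk c]
        rcases hcond with h | ⟨_, h⟩ <;> omega
      · have hgd := pvNbrs_getD g hk c
        have hg1 := pvGetD_one g hk hv c
        simp only [hgd]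
        rcases hcond with h3 | ⟨hmem, h2⟩
        · left; exact_mod_cast h3
        · right
          exact ⟨by rw [hg1, if_pos hmem]; norm_num, by exact_mod_cast h2⟩
theorem pvCnt_eq (s : List (Int × Int × Int)) (x y z : Int) :
    ([-1, 0, 1] : List Int).foldl (fun cnt dx =>
      ([-1, 0, 1] : List Int).foldl (fun cnt dy =>
        ([-1, 0, 1] : List Int).foldl (fun cnt dz =>
          if (dx ≠ 0 ∨ dy ≠ 0 ∨ dz ≠ 0) ∧ (x + dx, y + dy, z + dz) ∈ s then
            cnt + 1
          else cnt) cnt) cnt) (0 : Int) = (pvN s (x, y, z) : Int) := by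
  have h1 : ([-1, 0, 1] : List Int).foldl (fun cnt dx =>
      ([-1, 0, 1] : List Int).foldl (fun cnt dy =>
        ([-1, 0, 1] : List Int).foldl (fun cnt dz =>
          if (dx ≠ 0 ∨ dy ≠ 0 ∨ dz ≠ 0) ∧ (x + dx, y + dy, z + dz) ∈ s then
            cnt + 1
          else cnt) cnt) cnt) (0 : Int)
      = pvProduct3.foldl (fun cnt d =>
          if (d.1 ≠ 0 ∨ d.2.1 ≠ 0 ∨ d.2.2 ≠ 0) ∧ (x + d.1, y + d.2.1, z + d.2.2) ∈ s then
            cnt + 1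
          else cnt) (0 : Int) := by
    unfold pvProduct3
    rw [List.foldl_flatMap]
    apply PySem.List.foldl_congr_mem; intro acc dx _
    rw [List.foldl_flatMap]
    apply PySem.List.foldl_congr_mem; intro acc2 dy _
    rw [List.foldl_map]
  rw [h1, PySem.List.foldl_ite_add_one
    (p := fun d : Int × Int × Int =>
      (d.1 ≠ 0 ∨ d.2.1 ≠ 0 ∨ d.2.2 ≠ 0) ∧ (x + d.1, y + d.2.1, z + d.2.2) ∈ s)]
  have h2 : pvProduct3.countP (fun d : Int × Int × Int =>
      decide ((d.1 ≠ 0 ∨ d.2.1 ≠ 0 ∨ d.2.2 ≠ 0) ∧ (x + d.1, y + d.2.1, z + d.2.2) ∈ s))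
      = pvN s (x, y, z) := by
    unfold pvN pvD26
    rw [List.countP_filter]
    apply List.countP_congr; intro d _
    simp [pvShift, Bool.and_comm]
  rw [h2]; ring
theorem pvStepB_char (s : PySem.Set (Int × Int × Int)) (hs : s.Nodup) :
    (pvStepB s).Nodup ∧
      (∀ c, c ∈ pvStepB s ↔ (pvN s c = 3 ∨ (c ∈ s ∧ pvN s c = 2))) := by
  by_cases hempty : s = []
  · subst hempty
    constructor
    · simp [pvStepB]
    · intro c
      simp [pvStepB, pvN]
  · have hne : s.isEmpty = false := by simp [hempty]
    obtain ⟨mx, hmx⟩ := Option.ne_none_iff_exists'.1 (fun h =>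
      hempty (by simpa using (PySem.List.min?_eq_none_iff (s.map (·.1)) (fun v => v)).1 h))
    obtain ⟨Mx, hMx⟩ := Option.ne_none_iff_exists'.1 (fun h =>
      hempty (by simpa using (PySem.List.max?_eq_none_iff (s.map (·.1)) (fun v => v)).1 h))
    obtain ⟨my, hmy⟩ := Option.ne_none_iff_exists'.1 (fun h =>
      hempty (by simpa using (PySem.List.min?_eq_none_iff (s.map (·.2.1)) (fun v => v)).1 h))
    obtain ⟨My, hMy⟩ := Option.ne_none_iff_exists'.1 (fun h =>
      hempty (by simpa using (PySem.List.max?_eq_none_iff (s.map (·.2.1)) (fun v => v)).1 h))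
    obtain ⟨mz, hmz⟩ := Option.ne_none_iff_exists'.1 (fun h =>
      hempty (by simpa using (PySem.List.min?_eq_none_iff (s.map (·.2.2)) (fun v => v)).1 h))
    obtain ⟨Mz, hMz⟩ := Option.ne_none_iff_exists'.1 (fun h =>
      hempty (by simpa using (PySem.List.max?_eq_none_iff (s.map (·.2.2)) (fun v => v)).1 h))
    have hstep : pvStepB s =
        PySem.Set.ofList
          (((PySem.List.pyRange (mx - 1) (Mx + 1 + 1)).flatMap fun x =>
            (PySem.List.pyRange (my - 1) (My + 1 + 1)).flatMap fun y =>
              (PySem.List.pyRange (mz - 1) (Mz + 1 + 1)).map fun z => (x, y, z)).filter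
            fun c => decide ((pvN s c : Int) = 3 ∨ (c ∈ s ∧ (pvN s c : Int) = 2))) := by
      unfold pvStepB
      rw [if_neg (by simp [hne])]
      simp only [hmx, hMx, hmy, hMy, hmz, hMz, Option.getD_some]
      rw [PySem.Set.ofList_eq_foldl, ← PySem.List.foldl_ite_eq_foldl_filter
        (p := fun c : Int × Int × Int => (pvN s c : Int) = 3 ∨ (c ∈ s ∧ (pvN s c : Int) = 2))
        (f := PySem.Set.add)]
      rw [List.foldl_flatMap]
      apply PySem.List.foldl_congr_mem; intro acc x _
      rw [List.foldl_flatMap]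
      apply PySem.List.foldl_congr_mem; intro acc2 y _
      rw [List.foldl_map]
      apply PySem.List.foldl_congr_mem; intro acc3 z _
      rw [pvCnt_eq s x y z]
    refine ⟨by rw [hstep]; exact PySem.Set.nodup_ofList _, ?_⟩
    intro c
    rw [hstep, PySem.Set.mem_ofList, List.mem_filter]
    simp only [List.mem_flatMap, List.mem_map, decide_eq_true_eq]
    have hcast : ((pvN s c : Int) = 3 ∨ (c ∈ s ∧ (pvN s c : Int) = 2)) ↔
        (pvN s c = 3 ∨ (c ∈ s ∧ pvN s c = 2)) := by
      constructor <;> rintro (h | ⟨hm, h⟩)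
      · left; exact_mod_cast h
      · right; exact ⟨hm, by exact_mod_cast h⟩
      · left; exact_mod_cast h
      · right; exact ⟨hm, by exact_mod_cast h⟩
    constructor
    · rintro ⟨_, hcond⟩; exact hcast.1 hcond
    · intro hcond
      refine ⟨?_, hcast.2 hcond⟩
      -- c lies in the expanded bounding box
      have hbounds : mx - 1 ≤ c.1 ∧ c.1 ≤ Mx + 1 ∧ my - 1 ≤ c.2.1 ∧ c.2.1 ≤ My + 1 ∧
          mz - 1 ≤ c.2.2 ∧ c.2.2 ≤ Mz + 1 := by
        rcases hcond with h3 | ⟨hmem, _⟩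
        · have hpos : 0 < pvN s c := by omega
          rw [pvN, List.countP_pos_iff] at hpos
          obtain ⟨d, hd, hds⟩ := hpos
          rw [decide_eq_true_eq] at hds
          have hb := pvD26_bounds d hd
          have h1 := PySem.List.min?_isMin hmx _ (List.mem_map_of_mem hds (f := (·.1)))
          have h2 := PySem.List.max?_isMax hMx _ (List.mem_map_of_mem hds (f := (·.1)))
          have h3 := PySem.List.min?_isMin hmy _ (List.mem_map_of_mem hds (f := (·.2.1)))
          have h4 := PySem.List.max?_isMax hMy _ (List.mem_map_of_mem hds (f := (·.2.1)))
          have h5 := PySem.List.min?_isMin hmz _ (List.mem_map_of_mem hds (f := (·.2.2)))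
          have h6 := PySem.List.max?_isMax hMz _ (List.mem_map_of_mem hds (f := (·.2.2)))
          simp only [pvShift] at h1 h2 h3 h4 h5 h6
          omega
        · have h1 := PySem.List.min?_isMin hmx _ (List.mem_map_of_mem hmem (f := (·.1)))
          have h2 := PySem.List.max?_isMax hMx _ (List.mem_map_of_mem hmem (f := (·.1)))
          have h3 := PySem.List.min?_isMin hmy _ (List.mem_map_of_mem hmem (f := (·.2.1)))
          have h4 := PySem.List.max?_isMax hMy _ (List.mem_map_of_mem hmem (f := (·.2.1)))
          have h5 := PySem.List.min?_isMin hmz _ (List.mem_map_of_mem hmem (f := (·.2.2)))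
          have h6 := PySem.List.max?_isMax hMz _ (List.mem_map_of_mem hmem (f := (·.2.2)))
          omega
      refine ⟨c.1, ?_, c.2.1, ?_, c.2.2, ?_, rfl⟩ <;>
        rw [PySem.List.mem_pyRange_one] <;> omega
def pvRel (g : PySem.Dict (Int × Int × Int) Int) (s : List (Int × Int × Int)) : Prop :=
  g.keys.Nodup ∧ s.Nodup ∧ (∀ p ∈ g.items, p.2 = (1 : Int)) ∧ (∀ c, c ∈ g.keys ↔ c ∈ s)

theorem pvN_congr (s t : List (Int × Int × Int)) (c : Int × Int × Int)
    (h : ∀ x, x ∈ s ↔ x ∈ t) : pvN s c = pvN t c := by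
  apply List.countP_congr; intro d _; simp [h]

theorem pvStep_rel (g : PySem.Dict (Int × Int × Int) Int) (s : PySem.Set (Int × Int × Int))
    (h : pvRel g s) : pvRel (pvStepA g) (pvStepB s) := by
  obtain ⟨hk, hsn, hv, hmem⟩ := h
  obtain ⟨hk', hv', hmemA⟩ := pvStepA_char g hk hv
  obtain ⟨hsn', hmemB⟩ := pvStepB_char s hsn
  refine ⟨hk', hsn', hv', fun c => ?_⟩
  rw [hmemA c, hmemB c, pvN_congr g.keys s c hmem, hmem c]

theorem pvIter_rel (l : List Int) (g : PySem.Dict (Int × Int × Int) Int)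
    (s : PySem.Set (Int × Int × Int)) (h : pvRel g s) :
    pvRel (l.foldl (fun g _ => pvStepA g) g) (l.foldl (fun s _ => pvStepB s) s) := by
  induction l generalizing g s with
  | nil => exact h
  | cons x xs ih => exact ih _ _ (pvStep_rel g s h)

theorem pvParse_rel (rows : List (List Char)) :
    pvRel
      ((PySem.List.enumerate rows).foldl (fun g xr =>
        (PySem.List.enumerate xr.2).foldl (fun g yc =>
          if yc.2 = '#' then g.insert (xr.1, yc.1, (0 : Int)) 1 else g) g)
        PySem.Dict.empty)
      ((PySem.List.enumerate rows).foldl (fun s xr =>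
        (PySem.List.enumerate xr.2).foldl (fun s yc =>
          if yc.2 = '#' then PySem.Set.add s (xr.1, yc.1, (0 : Int)) else s) s)
        PySem.Set.empty) := by
  set P : List (Int × Int × Int) := (PySem.List.enumerate rows).flatMap (fun xr =>
    ((PySem.List.enumerate xr.2).filter (fun yc => decide (yc.2 = '#'))).map
      (fun yc => (xr.1, yc.1, (0 : Int)))) with hP
  have hA : (PySem.List.enumerate rows).foldl (fun g xr =>
        (PySem.List.enumerate xr.2).foldl (fun g yc =>
          if yc.2 = '#' then g.insert (xr.1, yc.1, (0 : Int)) 1 else g) g)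
        PySem.Dict.empty
      = P.foldl (fun g c => g.insert c (1 : Int)) PySem.Dict.empty := by
    rw [hP, List.foldl_flatMap]
    apply PySem.List.foldl_congr_mem; intro acc xr _
    rw [List.foldl_map, List.foldl_filter]
    apply PySem.List.foldl_congr_mem; intro acc2 yc _
    by_cases h : yc.2 = '#' <;> simp [h]
  have hB : (PySem.List.enumerate rows).foldl (fun s xr =>
        (PySem.List.enumerate xr.2).foldl (fun s yc =>
          if yc.2 = '#' then PySem.Set.add s (xr.1, yc.1, (0 : Int)) else s) s)
        PySem.Set.empty
      = PySem.Set.ofList P := by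
    rw [hP, PySem.Set.ofList_eq_foldl, List.foldl_flatMap]
    apply PySem.List.foldl_congr_mem; intro acc xr _
    rw [List.foldl_map, List.foldl_filter]
    apply PySem.List.foldl_congr_mem; intro acc2 yc _
    by_cases h : yc.2 = '#' <;> simp [h]
  rw [hA, hB]
  have hkeys : (P.foldl (fun g c => g.insert c (1 : Int)) PySem.Dict.empty).keys = PySem.Set.ofList P := by
    rw [PySem.Dict.keys_foldl_insert_key P (fun c => c) (fun _ _ => (1 : Int)) PySem.Dict.empty,
      PySem.Dict.keys_empty, List.map_id', PySem.Set.update_nil_left]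
  refine ⟨?_, PySem.Set.nodup_ofList _, ?_, ?_⟩
  · exact PySem.Dict.nodup_keys_foldl_insert_key P (fun c => c) (fun _ _ => (1 : Int))
      PySem.Dict.empty PySem.Dict.nodup_keys_empty
  · exact pvValuesOne P (fun c => c) PySem.Dict.empty (by simp [PySem.Dict.empty])
  · intro c; rw [hkeys]

theorem pvRel_count (g : PySem.Dict (Int × Int × Int) Int) (s : PySem.Set (Int × Int × Int))
    (h : pvRel g s) : (g.size : Int) = PySem.List.len s := by
  obtain ⟨hk, hsn, _, hmem⟩ := h
  have hperm : g.keys.Perm s := (List.perm_ext_iff_of_nodup hk hsn).2 hmem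
  have hlen : g.keys.length = s.length := hperm.length_eq
  simp only [PySem.Dict.keys, List.length_map] at hlen
  rw [PySem.List.len_eq, ← hlen]
  rfl

-- ===== VERDICT (by name: the statement is the Claim_ definition above) =====
theorem part_1_spec : Claim_equal_part_1 := by
  intro raw _
  simp only [Spec_part_1, part_1, part_1_alt]
  exact pvRel_count _ _ (pvIter_rel _ _ _ (pvParse_rel (PySem.Chars.splitOn raw.toList ['\n'])))
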